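-- pv_equiv track=rewrite | github.com/jramaswami/LeetCode_Python | maximum_number_of_points_from_grid_queries.py | maxPoints
-- ===== SOURCE A (Python) =====
-- from typing import List
-- import collections
-- import heapq
--
-- QItem = collections.namedtuple('QItem', ['value', 'row', 'col'])
--
-- def maxPoints(grid: List[List[int]], queries: List[int]) -> List[int]:
--     def inbounds(r, c):
--         return r >= 0 and c >= 0 and r < len(grid) and c < len(grid[r])
--
--     def neighbors(r, c):
--         for dr, dc in ((0, 1), (0, -1), (1, 0), (-1, 0)):
--             r0, c0 = r + dr, c + dc
--             if inbounds(r0, c0):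
--                 yield r0, c0
--
--     queue = [QItem(grid[0][0], 0, 0)]
--     queries0 = [(q, i) for i, q in enumerate(queries)]
--     queries0.sort()
--     visited = [[False for _ in row] for row in grid]
--     visited[0][0] = True
--     soln = [0 for _ in queries]
--     curr = 0
--     for q, i in queries0:
--         while queue and queue[0].value < q:
--             _, r, c = heapq.heappop(queue)
--             curr += 1
--             for r0, c0 in neighbors(r, c):
--                 if not visited[r0][c0]:
--                     visited[r0][c0] = True
--                     heapq.heappush(queue, QItem(grid[r0][c0], r0, c0))
--         soln[i] = curr
--     return soln
-- ===== SOURCE B (Python) =====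
-- from typing import List
--
--
-- def maxPoints(grid: List[List[int]], queries: List[int]) -> List[int]:
--     # Independent per-query DFS flood fill (no heap, no query sorting, no carried state).
--     rows = len(grid)
--
--     def count(q):
--         if not (grid and grid[0] and grid[0][0] < q):
--             return 0
--         seen = {(0, 0)}
--         stack = [(0, 0)]
--         n = 0
--         while stack:
--             r, c = stack.pop()
--             n += 1
--             for r0, c0 in ((r + 1, c), (r - 1, c), (r, c + 1), (r, c - 1)):
--                 if 0 <= r0 < rows and 0 <= c0 < len(grid[r0]) \
--                         and grid[r0][c0] < q and (r0, c0) not in seen: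
--                     seen.add((r0, c0))
--                     stack.append((r0, c0))
--         return n
--
--     return [count(q) for q in queries]
-- ===== Notes on version B (the rewrite author's own statement) =====
-- stated objective: simpler
-- what changed: Replaces the incremental Dijkstra-style expansion (min-heap frontier, queries sorted with their indices and answers scattered back) by an independent per-query DFS flood fill with an explicit stack that counts cells reachable from (0,0) through values < q.
import Mathlib
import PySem

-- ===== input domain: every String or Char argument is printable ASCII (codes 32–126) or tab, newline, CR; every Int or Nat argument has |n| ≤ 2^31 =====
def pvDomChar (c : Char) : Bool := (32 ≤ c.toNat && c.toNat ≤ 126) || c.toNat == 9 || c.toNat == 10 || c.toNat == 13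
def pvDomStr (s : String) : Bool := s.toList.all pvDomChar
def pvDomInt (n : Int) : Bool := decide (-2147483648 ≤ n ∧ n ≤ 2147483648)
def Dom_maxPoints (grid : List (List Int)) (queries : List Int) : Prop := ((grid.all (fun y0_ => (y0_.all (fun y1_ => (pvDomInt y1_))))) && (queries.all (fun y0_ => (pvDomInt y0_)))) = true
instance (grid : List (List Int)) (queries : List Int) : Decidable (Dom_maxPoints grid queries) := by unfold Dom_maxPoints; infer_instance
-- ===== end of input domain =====

-- B replaces A's incremental heap expansion over sorted queries by an independent
-- per-query DFS flood fill (alternative decomposition, not claimed faster).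

-- ===== PORT A =====
-- grid[r][c]; only read where the Python has already established both indices are in range
def pvCellVal (grid : List (List Int)) (p : Int × Int) : Int :=
  PySem.List.pyGetD (PySem.List.pyGetD grid p.1 []) p.2 0

def pvInbounds (grid : List (List Int)) (r c : Int) : Bool :=
  decide (0 ≤ r) && decide (0 ≤ c) && decide (r < PySem.List.len grid) &&
    decide (c < PySem.List.len (PySem.List.pyGetD grid r []))

def pvNeighbors (grid : List (List Int)) (r c : Int) : List (Int × Int) :=
  [(r, c + 1), (r, c - 1), (r + 1, c), (r - 1, c)].filter (fun p => pvInbounds grid p.1 p.2)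

-- heapq comparison on QItem(value, row, col): Python tuple order (lexicographic)
def pvQLt (a b : Int × Int × Int) : Bool :=
  decide (a.1 < b.1) ||
    (decide (a.1 = b.1) &&
      (decide (a.2.1 < b.2.1) || (decide (a.2.1 = b.2.1) && decide (a.2.2 < b.2.2))))

-- heapq is modelled by its observable behaviour: queue[0] / heappop sees the
-- lexicographically smallest item (exact here: the items are distinct triples);
-- heappush appends.
def pvHeapMin (x : Int × Int × Int) (t : List (Int × Int × Int)) : Int × Int × Int :=
  t.foldl (fun a b => if pvQLt b a then b else a) x

-- visited[r][c] reads/writes; Python only evaluates them on in-range indices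
def pvVGet (v : List (List Bool)) (r c : Int) : Bool :=
  PySem.List.pyGetD (PySem.List.pyGetD v r []) c true

def pvVSet (v : List (List Bool)) (r c : Int) : List (List Bool) :=
  PySem.List.pySetD v r (PySem.List.pySetD (PySem.List.pyGetD v r []) c true)

def pvCountFalse (v : List (List Bool)) : Nat := (v.map (fun row => row.count false)).sum

-- body of the `for r0, c0 in neighbors(r, c)` loop: mark-and-push an unvisited neighbour
def pvStepA (grid : List (List Int))
    (s : List (Int × Int × Int) × List (List Bool)) (p : Int × Int) :
    List (Int × Int × Int) × List (List Bool) :=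
  if pvVGet s.2 p.1 p.2 = false then
    (s.1 ++ [(pvCellVal grid p, p.1, p.2)], pvVSet s.2 p.1 p.2)
  else s

-- the `while queue and queue[0].value < q` loop; the fuel argument only makes it total
def pvAWhile (grid : List (List Int)) (q : Int) :
    Nat → List (Int × Int × Int) → List (List Bool) → Int →
      List (Int × Int × Int) × List (List Bool) × Int
  | 0, queue, visited, curr => (queue, visited, curr)
  | fuel + 1, queue, visited, curr =>
    match queue with
    | [] => (queue, visited, curr)
    | x :: t =>
      let m := pvHeapMin x t
      if m.1 < q then
        let st := (pvNeighbors grid m.2.1 m.2.2).foldl (pvStepA grid) ((x :: t).erase m, visited)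
        pvAWhile grid q fuel st.1 st.2 (curr + 1)
      else (queue, visited, curr)

def maxPoints (grid : List (List Int)) (queries : List Int) : List Int :=
  let queue0 : List (Int × Int × Int) := [(pvCellVal grid (0, 0), 0, 0)]
  let queries0 := PySem.List.sorted2
    ((PySem.List.enumerate queries).map (fun p => (p.2, p.1))) Prod.fst Prod.snd
  let visited0 := pvVSet (grid.map (fun row => row.map (fun _ => false))) 0 0
  let soln0 : List Int := queries.map (fun _ => 0)
  let final := queries0.foldl
    (fun (st : List (Int × Int × Int) × List (List Bool) × Int × List Int) qi =>
      let r := pvAWhile grid qi.1 (st.1.length + 2 * pvCountFalse st.2.1 + 1)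
        st.1 st.2.1 st.2.2.1
      (r.1, r.2.1, r.2.2, PySem.List.pySetD st.2.2.2 qi.2 r.2.2))
    (queue0, visited0, (0 : Int), soln0)
  final.2.2.2

-- ===== PORT B =====
def pvBStep (grid : List (List Int)) (rows q : Int)
    (s : PySem.Set (Int × Int) × List (Int × Int)) (p : Int × Int) :
    PySem.Set (Int × Int) × List (Int × Int) :=
  if decide (0 ≤ p.1) && decide (p.1 < rows) && decide (0 ≤ p.2) &&
      decide (p.2 < PySem.List.len (PySem.List.pyGetD grid p.1 [])) &&
      decide (pvCellVal grid p < q) && !(PySem.Set.contains s.1 p) then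
    (PySem.Set.add s.1 p, p :: s.2)
  else s

-- Python's stack (append / pop at the right end) is represented most-recent-first:
-- push = cons, pop = head; the fuel argument only makes the loop total
def pvBLoop (grid : List (List Int)) (rows q : Int) :
    Nat → PySem.Set (Int × Int) → List (Int × Int) → Int → Int
  | 0, _, _, n => n
  | _ + 1, _, [], n => n
  | fuel + 1, seen, p :: rest, n =>
    let s := [(p.1 + 1, p.2), (p.1 - 1, p.2), (p.1, p.2 + 1), (p.1, p.2 - 1)].foldl
      (pvBStep grid rows q) (seen, rest)
    pvBLoop grid rows q fuel s.1 s.2 (n + 1)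

-- all valid cells of the (possibly ragged) grid, row block by row block
def pvCellListAux : List (List Int) → Nat → List (Int × Int)
  | [], _ => []
  | row :: rest, r =>
    ((List.range row.length).map (fun c : Nat => ((r : Int), (c : Int)))) ++ pvCellListAux rest (r + 1)

def pvCellList (grid : List (List Int)) : List (Int × Int) := pvCellListAux grid 0

def pvBCount (grid : List (List Int)) (rows q : Int) : Int :=
  if decide (grid ≠ []) && decide (PySem.List.pyGetD grid 0 [] ≠ []) &&
      decide (pvCellVal grid (0, 0) < q) then
    pvBLoop grid rows q (2 * (pvCellList grid).length + 1)
      (PySem.Set.ofList [((0 : Int), (0 : Int))]) [((0 : Int), (0 : Int))] 0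
  else 0

def maxPoints_alt (grid : List (List Int)) (queries : List Int) : List Int :=
  let rows : Int := PySem.List.len grid
  queries.map (fun q => pvBCount grid rows q)

-- ===== PRECONDITION & SPEC =====
-- Pre_ excludes exactly the inputs on which A raises: grid[0][0] is an IndexError
-- when the grid, or its first row, is empty.
def Pre_maxPoints (grid : List (List Int)) (queries : List Int) : Prop :=
  grid ≠ [] ∧ grid.headI ≠ []
instance (grid : List (List Int)) (queries : List Int) : Decidable (Pre_maxPoints grid queries) := by
  unfold Pre_maxPoints; infer_instance

def pvWitness_maxPoints : List (List Int) × List Int := ([[1, 2], [3, 0]], [2, 3])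

def Spec_maxPoints (grid : List (List Int)) (queries : List Int) (out : List Int) : Prop :=
  out = maxPoints_alt grid queries
instance (grid : List (List Int)) (queries : List Int) (out : List Int) :
    Decidable (Spec_maxPoints grid queries out) := by unfold Spec_maxPoints; infer_instance

-- ===== CLAIM (what is proved, stated in full; the proofs are below) =====
def Claim_equal_maxPoints : Prop := ∀ (grid : List (List Int)) (queries : List Int),
  Dom_maxPoints grid queries → Pre_maxPoints grid queries →
    Spec_maxPoints grid queries (maxPoints grid queries)

-- ===== LEMMAS AND PROOFS =====

-- cells, adjacency, reachability
def pvValid (grid : List (List Int)) (p : Int × Int) : Prop :=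
  0 ≤ p.1 ∧ p.1 < (grid.length : Int) ∧ 0 ≤ p.2 ∧
    p.2 < ((grid.getD p.1.toNat []).length : Int)

def pvAdj (p p' : Int × Int) : Prop :=
  (p'.1 = p.1 + 1 ∧ p'.2 = p.2) ∨ (p'.1 = p.1 - 1 ∧ p'.2 = p.2) ∨
  (p'.1 = p.1 ∧ p'.2 = p.2 + 1) ∨ (p'.1 = p.1 ∧ p'.2 = p.2 - 1)

inductive pvReach (grid : List (List Int)) (q : Int) : Int × Int → Prop
  | start : pvValid grid (0, 0) → pvCellVal grid (0, 0) < q → pvReach grid q (0, 0)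
  | step {p p' : Int × Int} : pvReach grid q p → pvValid grid p' →
      pvCellVal grid p' < q → pvAdj p p' → pvReach grid q p'

noncomputable def pvReachCount (grid : List (List Int)) (q : Int) : Nat :=
  {p | pvReach grid q p}.ncard

theorem pvGetD_nonneg {α : Type} (xs : List α) {i : Int} (d : α) (h : 0 ≤ i) :
    PySem.List.pyGetD xs i d = xs.getD i.toNat d := by
  simp only [PySem.List.pyGetD, PySem.List.pyGet?, PySem.List.pyIdx?, h, if_pos]
  by_cases hi : i < (xs.length : Int)
  · simp [hi, List.getD, List.getElem?_eq_getElem (by omega : i.toNat < xs.length)]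
  · simp [hi, List.getD]
    rw [List.getElem?_eq_none (by omega)]
    rfl

theorem pvReach_valid {grid : List (List Int)} {q : Int} {p : Int × Int}
    (h : pvReach grid q p) : pvValid grid p := by
  cases h with
  | start hv _ => exact hv
  | step _ hv _ _ => exact hv

theorem pvReach_mono {grid : List (List Int)} {q q' : Int} (hq : q ≤ q') {p : Int × Int}
    (h : pvReach grid q p) : pvReach grid q' p := by
  induction h with
  | start hv hlt => exact pvReach.start hv (lt_of_lt_of_le hlt hq)
  | step _ hv hlt hadj ih => exact pvReach.step ih hv (lt_of_lt_of_le hlt hq) hadj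

theorem pvReach_set_eq {grid : List (List Int)} {q : Int} (P : Finset (Int × Int))
    (h1 : ∀ p ∈ P, pvReach grid q p)
    (h2 : pvValid grid (0, 0) → pvCellVal grid (0, 0) < q → (0, 0) ∈ P)
    (h3 : ∀ p ∈ P, ∀ p', pvValid grid p' → pvCellVal grid p' < q → pvAdj p p' → p' ∈ P) :
    {p | pvReach grid q p} = (P : Set (Int × Int)) := by
  ext p
  simp only [Set.mem_setOf_eq, Finset.coe_sort_coe, Finset.mem_coe]
  constructor
  · intro h
    induction h with
    | start hv hlt => exact h2 hv hlt
    | step hr hv hlt hadj ih => exact h3 _ ih _ hv hlt hadj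
  · exact h1 p

theorem pvReach_count_eq {grid : List (List Int)} {q : Int} (P : Finset (Int × Int))
    (h : {p | pvReach grid q p} = (P : Set (Int × Int))) :
    pvReachCount grid q = P.card := by
  rw [pvReachCount, h, Set.ncard_coe_finset]

theorem pvReach_empty {grid : List (List Int)} {q : Int}
    (h : ¬ (pvValid grid (0, 0) ∧ pvCellVal grid (0, 0) < q)) :
    pvReachCount grid q = 0 := by
  have : {p | pvReach grid q p} = (∅ : Set (Int × Int)) := by
    ext p
    simp only [Set.mem_setOf_eq, Set.mem_empty_iff_false, iff_false]
    intro hr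
    induction hr with
    | start hv hlt => exact h ⟨hv, hlt⟩
    | step _ _ _ _ ih => exact ih
  rw [pvReachCount, this, Set.ncard_empty]

-- valid = inbounds; neighbors characterization
theorem pvInbounds_iff {grid : List (List Int)} {r c : Int} :
    pvInbounds grid r c = true ↔ pvValid grid (r, c) := by
  unfold pvInbounds pvValid
  simp only [Bool.and_eq_true, decide_eq_true_eq, PySem.List.len_eq]
  constructor
  · rintro ⟨⟨⟨h1, h2⟩, h3⟩, h4⟩
    rw [pvGetD_nonneg grid ([] : List Int) h1] at h4
    exact ⟨h1, h3, h2, h4⟩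
  · rintro ⟨h1, h3, h2, h4⟩
    rw [pvGetD_nonneg grid ([] : List Int) h1]
    exact ⟨⟨⟨h1, h2⟩, h3⟩, h4⟩

theorem pvMem_neighbors {grid : List (List Int)} {r c : Int} {p' : Int × Int} :
    p' ∈ pvNeighbors grid r c ↔ pvValid grid p' ∧ pvAdj (r, c) p' := by
  rcases p' with ⟨a, b⟩
  simp only [pvNeighbors, List.mem_filter, List.mem_cons, List.not_mem_nil, or_false,
    Prod.mk.injEq, pvAdj, pvInbounds_iff]
  constructor
  · rintro ⟨hmem, hv⟩
    exact ⟨hv, by tauto⟩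
  · rintro ⟨hv, hadj⟩
    exact ⟨by tauto, hv⟩

theorem pvAdj_mem_four {p p' : Int × Int} (h : pvAdj p p') :
    p' ∈ [(p.1 + 1, p.2), (p.1 - 1, p.2), (p.1, p.2 + 1), (p.1, p.2 - 1)] := by
  rcases p' with ⟨a, b⟩
  simp only [pvAdj] at h
  simp only [List.mem_cons, List.not_mem_nil, or_false, Prod.mk.injEq]
  tauto

-- heap-min facts
theorem pvHeapMin_mem (x : Int × Int × Int) (t : List (Int × Int × Int)) :
    pvHeapMin x t ∈ x :: t := by
  induction t generalizing x with
  | nil => simp [pvHeapMin]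
  | cons y ys ih =>
    simp only [pvHeapMin, List.foldl_cons]
    by_cases h : pvQLt y x = true
    · simp only [h, if_pos]
      have := ih y
      simp only [pvHeapMin] at this
      rcases List.mem_cons.mp this with h' | h'
      · exact List.mem_cons.mpr (Or.inr (List.mem_cons.mpr (Or.inl h')))
      · exact List.mem_cons.mpr (Or.inr (List.mem_cons.mpr (Or.inr h')))
    · simp only [h, if_neg, Bool.not_eq_true]
      have := ih x
      simp only [pvHeapMin] at this
      rcases List.mem_cons.mp this with h' | h'
      · exact List.mem_cons.mpr (Or.inl h')
      · exact List.mem_cons.mpr (Or.inr (List.mem_cons.mpr (Or.inr h')))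

theorem pvQLt_true_fst {a b : Int × Int × Int} (h : pvQLt a b = true) : a.1 ≤ b.1 := by
  simp only [pvQLt, Bool.or_eq_true, Bool.and_eq_true, decide_eq_true_eq] at h
  rcases h with h | ⟨h, _⟩ <;> omega

theorem pvQLt_false_fst {a b : Int × Int × Int} (h : pvQLt a b = false) : b.1 ≤ a.1 := by
  simp only [pvQLt, Bool.or_eq_false_iff, Bool.and_eq_false_iff, decide_eq_false_iff_not] at h
  omega

theorem pvHeapMin_fst_le (x : Int × Int × Int) (t : List (Int × Int × Int)) :
    ∀ y ∈ x :: t, (pvHeapMin x t).1 ≤ y.1 := by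
  induction t generalizing x with
  | nil =>
    intro y hy
    rcases List.mem_cons.mp hy with h | h
    · subst h; simp [pvHeapMin]
    · simp at h
  | cons z zs ih =>
    intro y hy
    simp only [pvHeapMin, List.foldl_cons]
    have step : (if pvQLt z x = true then z else x).1 ≤ x.1 ∧
        (if pvQLt z x = true then z else x).1 ≤ z.1 := by
      by_cases h : pvQLt z x = true
      · simp only [h, if_pos]
        exact ⟨pvQLt_true_fst h, le_refl _⟩
      · simp only [h, if_neg, Bool.not_eq_true]
        exact ⟨le_refl _, pvQLt_false_fst (by simpa using h)⟩
    have ihh := ih (if pvQLt z x = true then z else x)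
    simp only [pvHeapMin] at ihh
    have hacc := ihh _ (List.mem_cons_self)
    rcases List.mem_cons.mp hy with h | h
    · subst h; exact le_trans hacc step.1
    · rcases List.mem_cons.mp h with h | h
      · subst h; exact le_trans hacc step.2
      · exact ihh y (List.mem_cons.mpr (Or.inr h))

-- visited-matrix facts
def pvShape (grid : List (List Int)) (v : List (List Bool)) : Prop :=
  v.length = grid.length ∧ ∀ r : Nat, (v.getD r []).length = (grid.getD r []).length

theorem pvGetD_set {α : Type} (l : List α) (n m : Nat) (a : α) (d : α) :
    (l.set n a).getD m d = if m = n ∧ n < l.length then a else l.getD m d := by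
  by_cases h1 : m = n
  · subst h1
    by_cases h2 : m < l.length
    · simp [h2, List.getD, List.getElem?_set_self h2]
    · rw [List.set_eq_of_length_le (by omega)]
      simp [h2]
  · simp only [h1, false_and, if_neg, not_false_eq_true]
    simp [List.getD, List.getElem?_set_ne (by omega : n ≠ m)]

theorem pvVGet_eq (v : List (List Bool)) {r c : Int} (hr : 0 ≤ r) (hc : 0 ≤ c) :
    pvVGet v r c = (v.getD r.toNat []).getD c.toNat true := by
  unfold pvVGet
  rw [pvGetD_nonneg v ([] : List Bool) hr, pvGetD_nonneg (v.getD r.toNat []) true hc]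

theorem pvVSet_eq (v : List (List Bool)) {r c : Int} (hr : 0 ≤ r) (hc : 0 ≤ c) :
    pvVSet v r c = v.set r.toNat ((v.getD r.toNat []).set c.toNat true) := by
  unfold pvVSet
  rw [pvGetD_nonneg v ([] : List Bool) hr, PySem.List.pySetD_of_nonneg _ _ hc,
    PySem.List.pySetD_of_nonneg _ _ hr]

theorem pvShape_vset {grid : List (List Int)} {v : List (List Bool)} {r c : Int}
    (hs : pvShape grid v) (hr : 0 ≤ r) (hc : 0 ≤ c) : pvShape grid (pvVSet v r c) := by
  rw [pvVSet_eq v hr hc]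
  refine ⟨by simpa using hs.1, fun rn => ?_⟩
  rw [pvGetD_set]
  split
  · next h =>
    rw [← h.1, List.length_set]
    exact hs.2 rn
  · exact hs.2 rn

theorem pvVGet_vset {v : List (List Bool)} {r c r' c' : Int}
    (hr : 0 ≤ r) (hc : 0 ≤ c) (hr' : 0 ≤ r') (hc' : 0 ≤ c') :
    pvVGet (pvVSet v r c) r' c' =
      if r' = r ∧ c' = c ∧ r.toNat < v.length ∧ c.toNat < (v.getD r.toNat []).length
      then true else pvVGet v r' c' := by
  rw [pvVSet_eq v hr hc, pvVGet_eq _ hr' hc', pvVGet_eq v hr' hc', pvGetD_set]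
  by_cases h1 : r'.toNat = r.toNat ∧ r.toNat < v.length
  · simp only [h1, and_self, if_pos]
    rw [← h1.1, pvGetD_set, h1.1]
    by_cases h2 : c'.toNat = c.toNat ∧ c.toNat < (v.getD r.toNat []).length
    · simp only [h2, and_self, if_pos]
      have : r' = r ∧ c' = c ∧ r.toNat < v.length ∧ c.toNat < (v.getD r.toNat []).length := by
        refine ⟨by omega, by omega, h1.2, h2.2⟩
      simp [this]
    · have hne : ¬ (r' = r ∧ c' = c ∧ r.toNat < v.length ∧
          c.toNat < (v.getD r.toNat []).length) := by
        intro hcon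
        exact h2 ⟨by omega, hcon.2.2.2⟩
      simp only [h2, if_neg, not_false_eq_true]
      rw [if_neg (by tauto)]
  · have hne : ¬ (r' = r ∧ c' = c ∧ r.toNat < v.length ∧
        c.toNat < (v.getD r.toNat []).length) := by
      intro hcon
      exact h1 ⟨by omega, hcon.2.2.1⟩
    simp only [h1, if_neg, not_false_eq_true, hne]

theorem pvCountRow_set {l : List Bool} {cn : Nat} (h : l.getD cn true = false) :
    (l.set cn true).count false + 1 = l.count false := by
  induction l generalizing cn with
  | nil => simp [List.getD] at h
  | cons b bs ih =>
    cases cn with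
    | zero =>
      simp only [List.getD_cons_zero] at h
      subst h
      simp [List.count_cons]
    | succ k =>
      simp only [List.getD_cons_succ] at h
      simp only [List.set_cons_succ, List.count_cons]
      have := ih h
      cases b <;> simp_all <;> omega

theorem pvCountFalse_set {v : List (List Bool)} {rn cn : Nat}
    (h : (v.getD rn []).getD cn true = false) :
    pvCountFalse (v.set rn ((v.getD rn []).set cn true)) + 1 = pvCountFalse v := by
  induction v generalizing rn with
  | nil => simp [List.getD] at h
  | cons row rest ih =>
    cases rn with
    | zero =>
      simp only [List.getD_cons_zero] at h ⊢
      simp only [List.set_cons_zero, pvCountFalse, List.map_cons, List.sum_cons]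
      have := pvCountRow_set h
      omega
    | succ k =>
      simp only [List.getD_cons_succ] at h ⊢
      simp only [List.set_cons_succ, pvCountFalse, List.map_cons, List.sum_cons]
      have := ih h
      simp only [pvCountFalse] at this
      omega

theorem pvCountFalse_vset {v : List (List Bool)} {r c : Int}
    (hr : 0 ≤ r) (hc : 0 ≤ c) (h : pvVGet v r c = false) :
    pvCountFalse (pvVSet v r c) + 1 = pvCountFalse v := by
  rw [pvVSet_eq v hr hc]
  rw [pvVGet_eq v hr hc] at h
  exact pvCountFalse_set h

theorem pvVGet_false_range {v : List (List Bool)} {r c : Int}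
    (hr : 0 ≤ r) (hc : 0 ≤ c) (h : pvVGet v r c = false) :
    r.toNat < v.length ∧ c.toNat < (v.getD r.toNat []).length := by
  rw [pvVGet_eq v hr hc] at h
  by_cases h1 : r.toNat < v.length
  · refine ⟨h1, ?_⟩
    by_cases h2 : c.toNat < (v.getD r.toNat []).length
    · exact h2
    · rw [List.getD_eq_default _ _ (by omega)] at h
      simp at h
  · exfalso
    have hv : v.getD r.toNat [] = [] := List.getD_eq_default _ _ (by omega)
    rw [hv] at h
    simp [List.getD] at h

-- cell list facts
theorem pvMem_block {n : Nat} {k : Nat} {p : Int × Int} :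
    p ∈ (List.range n).map (fun c : Nat => ((k : Int), (c : Int))) ↔
      ∃ c : Nat, c < n ∧ p = ((k : Int), (c : Int)) := by
  constructor
  · intro h
    rcases List.mem_map.mp h with ⟨c, hc, heq⟩
    exact ⟨c, List.mem_range.mp hc, heq.symm⟩
  · rintro ⟨c, hc, rfl⟩
    exact List.mem_map.mpr ⟨c, List.mem_range.mpr hc, rfl⟩

theorem pvMem_cellListAux {g : List (List Int)} {k : Nat} {p : Int × Int} :
    p ∈ pvCellListAux g k ↔
      ∃ r c : Nat, r < g.length ∧ c < (g.getD r []).length ∧ p = ((k + r : Int), (c : Int)) := by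
  induction g generalizing k with
  | nil => simp [pvCellListAux]
  | cons row rest ih =>
    simp only [pvCellListAux, List.mem_append, pvMem_block, ih, List.length_cons]
    constructor
    · rintro (⟨c, hc, rfl⟩ | ⟨r, c, hr, hc, rfl⟩)
      · refine ⟨0, c, by omega, by simpa using hc, by norm_num⟩
      · refine ⟨r + 1, c, by omega, by simpa using hc, ?_⟩
        have : ((k : Int) + 1 + (r : Int)) = ((k : Int) + ((r : Int) + 1)) := by ring
        simp [this]
    · rintro ⟨r, c, hr, hc, rfl⟩
      cases r with
      | zero => exact Or.inl ⟨c, by simpa using hc, by norm_num⟩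
      | succ r' =>
        refine Or.inr ⟨r', c, by omega, by simpa using hc, ?_⟩
        have : ((k : Int) + 1 + (r' : Int)) = ((k : Int) + ((r' : Int) + 1)) := by ring
        simp [this]

theorem pvMem_cellList {grid : List (List Int)} {p : Int × Int} :
    p ∈ pvCellList grid ↔ pvValid grid p := by
  rcases p with ⟨a, b⟩
  rw [pvCellList, pvMem_cellListAux]
  unfold pvValid
  dsimp only
  constructor
  · rintro ⟨r, c, hr, hc, heq⟩
    rw [Prod.mk.injEq] at heq
    obtain ⟨ha, hb⟩ := heq
    have ha' : a.toNat = r := by omega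
    rw [ha']
    refine ⟨by omega, by omega, by omega, by omega⟩
  · rintro ⟨h1, h2, h3, h4⟩
    refine ⟨a.toNat, b.toNat, by omega, ?_, ?_⟩
    · have : ((a.toNat : Nat) : Int) = a := by omega
      omega
    · rw [Prod.mk.injEq]
      constructor <;> omega

theorem pvLength_le_cellList {grid : List (List Int)} {l : List (Int × Int)}
    (hn : l.Nodup) (hv : ∀ p ∈ l, pvValid grid p) : l.length ≤ (pvCellList grid).length := by
  exact (List.subperm_of_subset hn (fun p hp => pvMem_cellList.mpr (hv p hp))).length_le

-- ===== A-side invariant =====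
def pvCells (queue : List (Int × Int × Int)) : List (Int × Int) :=
  queue.map (fun t => (t.2.1, t.2.2))

structure pvInvA (grid : List (List Int)) (q : Int) (queue : List (Int × Int × Int))
    (visited : List (List Bool)) (curr : Int) (P : Finset (Int × Int)) : Prop where
  shape : pvShape grid visited
  vis : ∀ p : Int × Int, pvValid grid p →
    (pvVGet visited p.1 p.2 = true ↔ p ∈ P ∨ p ∈ pvCells queue)
  qitems : ∀ t ∈ queue, pvValid grid (t.2.1, t.2.2) ∧ t.1 = pvCellVal grid (t.2.1, t.2.2)
  qnodup : (pvCells queue).Nodup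
  pdisj : ∀ p ∈ P, p ∉ pvCells queue
  preach : ∀ p ∈ P, pvReach grid q p
  start : (0, 0) ∈ P ∨ (0, 0) ∈ pvCells queue
  gen : ∀ p ∈ pvCells queue, p = (0, 0) ∨ ∃ p0 ∈ P, pvAdj p0 p
  closure : ∀ p ∈ P, ∀ p', pvValid grid p' → pvAdj p p' → (p' ∈ P ∨ p' ∈ pvCells queue)
  card : curr = (P.card : Int)

theorem pvInvA_mono {grid : List (List Int)} {q q' : Int} {queue visited curr P}
    (h : pvInvA grid q queue visited curr P) (hq : q ≤ q') :
    pvInvA grid q' queue visited curr P :=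
  { h with preach := fun p hp => pvReach_mono hq (h.preach p hp) }

def pvMu (queue : List (Int × Int × Int)) (visited : List (List Bool)) : Nat :=
  queue.length + 2 * pvCountFalse visited

structure pvMid (grid : List (List Int)) (q : Int) (P : Finset (Int × Int)) (pm : Int × Int)
    (s : List (Int × Int × Int) × List (List Bool)) : Prop where
  shape : pvShape grid s.2
  vis : ∀ p : Int × Int, pvValid grid p →
    (pvVGet s.2 p.1 p.2 = true ↔ p ∈ insert pm P ∨ p ∈ pvCells s.1)
  qitems : ∀ t ∈ s.1, pvValid grid (t.2.1, t.2.2) ∧ t.1 = pvCellVal grid (t.2.1, t.2.2)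
  qnodup : (pvCells s.1).Nodup
  pdisj : ∀ p ∈ insert pm P, p ∉ pvCells s.1
  start : ((0 : Int), (0 : Int)) ∈ insert pm P ∨ ((0 : Int), (0 : Int)) ∈ pvCells s.1
  gen : ∀ p ∈ pvCells s.1, p = ((0 : Int), (0 : Int)) ∨ ∃ p0 ∈ insert pm P, pvAdj p0 p
  closure : ∀ p ∈ P, ∀ p', pvValid grid p' → pvAdj p p' → (p' ∈ insert pm P ∨ p' ∈ pvCells s.1)

theorem pvStepA_cells_mono {grid : List (List Int)} {s : List (Int × Int × Int) × List (List Bool)}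
    {p' : Int × Int} {p : Int × Int} (h : p ∈ pvCells s.1) : p ∈ pvCells (pvStepA grid s p').1 := by
  unfold pvStepA
  split
  · simp only [pvCells, List.map_append]
    exact List.mem_append_left _ h
  · exact h

theorem pvFoldA_cells_mono {grid : List (List Int)} :
    ∀ (ns : List (Int × Int)) (s : List (Int × Int × Int) × List (List Bool)) {p : Int × Int},
      p ∈ pvCells s.1 → p ∈ pvCells (ns.foldl (pvStepA grid) s).1 := by
  intro ns
  induction ns with
  | nil => exact fun s p h => h
  | cons b bs ih =>
    intro s p h
    simp only [List.foldl_cons]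
    exact ih _ (pvStepA_cells_mono h)

theorem pvStepA_mid {grid : List (List Int)} {q : Int} {P : Finset (Int × Int)} {pm : Int × Int}
    {s : List (Int × Int × Int) × List (List Bool)} {p' : Int × Int}
    (hv : pvValid grid p') (hadj : pvAdj pm p') (hmid : pvMid grid q P pm s) :
    pvMid grid q P pm (pvStepA grid s p') ∧
    (p' ∈ insert pm P ∨ p' ∈ pvCells (pvStepA grid s p').1) ∧
    (pvStepA grid s p').1.length + 2 * pvCountFalse (pvStepA grid s p').2 ≤
      s.1.length + 2 * pvCountFalse s.2 := by
  obtain ⟨hv1, hv2, hv3, hv4⟩ := hv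
  unfold pvStepA
  by_cases hvg : pvVGet s.2 p'.1 p'.2 = false
  · -- p' is unvisited: push and mark
    simp only [hvg, if_pos]
    have hrange := pvVGet_false_range hv1 hv3 hvg
    have hnotin : p' ∉ insert pm P ∧ p' ∉ pvCells s.1 := by
      constructor <;> intro hcon
      · have := (hmid.vis p' ⟨hv1, hv2, hv3, hv4⟩).mpr (Or.inl hcon)
        rw [hvg] at this; exact Bool.false_ne_true this
      · have := (hmid.vis p' ⟨hv1, hv2, hv3, hv4⟩).mpr (Or.inr hcon)
        rw [hvg] at this; exact Bool.false_ne_true this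
    have hcells : pvCells (s.1 ++ [(pvCellVal grid p', p'.1, p'.2)]) = pvCells s.1 ++ [p'] := by
      simp [pvCells]
    refine ⟨?_, ?_, ?_⟩
    · refine ⟨pvShape_vset hmid.shape hv1 hv3, ?_, ?_, ?_, ?_, ?_, ?_, ?_⟩
      · -- vis
        intro p hp
        rw [pvVGet_vset hv1 hv3 hp.1 hp.2.2.1, hcells]
        by_cases hpp : p = p'
        · subst hpp
          rw [if_pos ⟨rfl, rfl, hrange.1, hrange.2⟩]
          simp [List.mem_append]
        · rw [if_neg (by
            rintro ⟨h1, h2, -, -⟩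
            exact hpp (Prod.ext h1 h2))]
          rw [hmid.vis p hp]
          constructor
          · rintro (h | h)
            · exact Or.inl h
            · exact Or.inr (List.mem_append_left _ h)
          · rintro (h | h)
            · exact Or.inl h
            · rcases List.mem_append.mp h with h | h
              · exact Or.inr h
              · simp only [List.mem_singleton] at h
                exact absurd h hpp
      · -- qitems
        intro t ht
        rcases List.mem_append.mp ht with h | h
        · exact hmid.qitems t h
        · simp only [List.mem_singleton] at h
          subst h
          exact ⟨⟨hv1, hv2, hv3, hv4⟩, rfl⟩
      · -- qnodup
        rw [hcells]
        exact List.Nodup.append hmid.qnodup (List.nodup_singleton _)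
          (by
            intro a ha hb
            simp only [List.mem_singleton] at hb
            subst hb
            exact hnotin.2 ha)
      · -- pdisj
        intro p hp
        rw [hcells]
        intro hcon
        rcases List.mem_append.mp hcon with h | h
        · exact hmid.pdisj p hp h
        · simp only [List.mem_singleton] at h
          subst h
          exact hnotin.1 hp
      · -- start
        rcases hmid.start with h | h
        · exact Or.inl h
        · rw [hcells]
          exact Or.inr (List.mem_append_left _ h)
      · -- gen
        intro p hp
        rw [hcells] at hp
        rcases List.mem_append.mp hp with h | h
        · exact hmid.gen p h
        · simp only [List.mem_singleton] at h
          subst h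
          exact Or.inr ⟨pm, Finset.mem_insert_self _ _, hadj⟩
      · -- closure
        intro p hp p'' hv'' hadj''
        rcases hmid.closure p hp p'' hv'' hadj'' with h | h
        · exact Or.inl h
        · rw [hcells]
          exact Or.inr (List.mem_append_left _ h)
    · rw [hcells]
      exact Or.inr (List.mem_append_right _ (List.mem_singleton_self _))
    · have hcf := pvCountFalse_vset hv1 hv3 hvg
      simp only [List.length_append, List.length_singleton]
      omega
  · -- p' already visited: state unchanged
    rw [if_neg hvg]
    have hvt : pvVGet s.2 p'.1 p'.2 = true := by
      cases h : pvVGet s.2 p'.1 p'.2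
      · exact absurd h hvg
      · rfl
    exact ⟨hmid, (hmid.vis p' ⟨hv1, hv2, hv3, hv4⟩).mp hvt, le_refl _⟩

theorem pvFoldA_mid {grid : List (List Int)} {q : Int} {P : Finset (Int × Int)} {pm : Int × Int} :
    ∀ (ns : List (Int × Int)) (s : List (Int × Int × Int) × List (List Bool)),
      (∀ p' ∈ ns, pvValid grid p' ∧ pvAdj pm p') → pvMid grid q P pm s →
      pvMid grid q P pm (ns.foldl (pvStepA grid) s) ∧
      (∀ p' ∈ ns, p' ∈ insert pm P ∨ p' ∈ pvCells (ns.foldl (pvStepA grid) s).1) ∧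
      (ns.foldl (pvStepA grid) s).1.length + 2 * pvCountFalse (ns.foldl (pvStepA grid) s).2 ≤
        s.1.length + 2 * pvCountFalse s.2 := by
  intro ns
  induction ns with
  | nil => exact fun s _ hmid => ⟨hmid, by simp, le_refl _⟩
  | cons p' rest ih =>
    intro s hns hmid
    obtain ⟨hv, hadj⟩ := hns p' (List.mem_cons_self)
    obtain ⟨hmid', hmem', hmu'⟩ := pvStepA_mid hv hadj hmid
    obtain ⟨hmidF, hmemF, hmuF⟩ :=
      ih (pvStepA grid s p') (fun a ha => hns a (List.mem_cons.mpr (Or.inr ha))) hmid'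
    refine ⟨hmidF, ?_, by simp only [List.foldl_cons]; omega⟩
    intro a ha
    rcases List.mem_cons.mp ha with h | h
    · subst h
      rcases hmem' with h | h
      · exact Or.inl h
      · right
        simp only [List.foldl_cons]
        exact pvFoldA_cells_mono rest _ h
    · exact hmemF a h

theorem pvIter_spec {grid : List (List Int)} {q : Int}
    {x : Int × Int × Int} {t : List (Int × Int × Int)} {visited : List (List Bool)}
    {curr : Int} {P : Finset (Int × Int)}
    (inv : pvInvA grid q (x :: t) visited curr P)
    (hlt : (pvHeapMin x t).1 < q) :
    ∃ P', pvInvA grid q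
        ((pvNeighbors grid (pvHeapMin x t).2.1 (pvHeapMin x t).2.2).foldl (pvStepA grid)
          ((x :: t).erase (pvHeapMin x t), visited)).1
        ((pvNeighbors grid (pvHeapMin x t).2.1 (pvHeapMin x t).2.2).foldl (pvStepA grid)
          ((x :: t).erase (pvHeapMin x t), visited)).2
        (curr + 1) P' ∧
      pvMu ((pvNeighbors grid (pvHeapMin x t).2.1 (pvHeapMin x t).2.2).foldl (pvStepA grid)
          ((x :: t).erase (pvHeapMin x t), visited)).1
        ((pvNeighbors grid (pvHeapMin x t).2.1 (pvHeapMin x t).2.2).foldl (pvStepA grid)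
          ((x :: t).erase (pvHeapMin x t), visited)).2 < pvMu (x :: t) visited := by
  set m := pvHeapMin x t with hm
  set pm : Int × Int := (m.2.1, m.2.2) with hpm
  have hmem : m ∈ x :: t := pvHeapMin_mem x t
  have hpmcell : pm ∈ pvCells (x :: t) := List.mem_map.mpr ⟨m, hmem, rfl⟩
  obtain ⟨hpv, hval⟩ := inv.qitems m hmem
  have hvlt : pvCellVal grid pm < q := by rw [← hval]; exact hlt
  have hreach : pvReach grid q pm := by
    rcases inv.gen pm hpmcell with h | ⟨p0, hp0, hadj⟩
    · rw [h]
      have h1 : pvValid grid ((0 : Int), (0 : Int)) := by rw [← h]; exact hpv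
      have h2 : pvCellVal grid ((0 : Int), (0 : Int)) < q := by rw [← h]; exact hvlt
      exact pvReach.start h1 h2
    · exact pvReach.step (inv.preach p0 hp0) hpv hvlt hadj
  have hperm : (x :: t).Perm (m :: (x :: t).erase m) := List.perm_cons_erase hmem
  have hcperm : (pvCells (x :: t)).Perm (pm :: pvCells ((x :: t).erase m)) := by
    simpa [pvCells] using hperm.map (fun t0 => (t0.2.1, t0.2.2))
  have hcn : (pm :: pvCells ((x :: t).erase m)).Nodup := hcperm.nodup_iff.mp inv.qnodup
  have hpmnotin : pm ∉ pvCells ((x :: t).erase m) := (List.nodup_cons.mp hcn).1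
  have hrestnd : (pvCells ((x :: t).erase m)).Nodup := (List.nodup_cons.mp hcn).2
  have hmemiff : ∀ p : Int × Int,
      p ∈ pvCells (x :: t) ↔ p = pm ∨ p ∈ pvCells ((x :: t).erase m) := by
    intro p
    rw [hcperm.mem_iff, List.mem_cons]
  have hsub : ∀ t0 ∈ (x :: t).erase m, t0 ∈ x :: t :=
    fun t0 h => (List.erase_sublist).mem h
  have hpmP : pm ∉ P := fun hcon => inv.pdisj pm hcon hpmcell
  -- the pvMid invariant holds at the start of the neighbour loop
  have hmid0 : pvMid grid q P pm ((x :: t).erase m, visited) := by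
    refine ⟨inv.shape, ?_, ?_, hrestnd, ?_, ?_, ?_, ?_⟩
    · intro p hp
      rw [inv.vis p hp]
      rw [hmemiff p, Finset.mem_insert]
      tauto
    · exact fun t0 h => inv.qitems t0 (hsub t0 h)
    · intro p hp
      rcases Finset.mem_insert.mp hp with h | h
      · rw [h]; exact hpmnotin
      · intro hcon
        exact inv.pdisj p h ((hmemiff p).mpr (Or.inr hcon))
    · rcases inv.start with h | h
      · exact Or.inl (Finset.mem_insert.mpr (Or.inr h))
      · rcases (hmemiff _).mp h with h' | h'
        · exact Or.inl (Finset.mem_insert.mpr (Or.inl h'))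
        · exact Or.inr h'
    · intro p hp
      rcases inv.gen p ((hmemiff p).mpr (Or.inr hp)) with h | ⟨p0, hp0, hadj⟩
      · exact Or.inl h
      · exact Or.inr ⟨p0, Finset.mem_insert.mpr (Or.inr hp0), hadj⟩
    · intro p hp p' hv' hadj'
      rcases inv.closure p hp p' hv' hadj' with h | h
      · exact Or.inl (Finset.mem_insert.mpr (Or.inr h))
      · rcases (hmemiff p').mp h with h' | h'
        · exact Or.inl (Finset.mem_insert.mpr (Or.inl h'))
        · exact Or.inr h'
  have hns : ∀ p' ∈ pvNeighbors grid m.2.1 m.2.2, pvValid grid p' ∧ pvAdj pm p' := by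
    intro p' hp'
    exact pvMem_neighbors.mp hp'
  obtain ⟨hmidF, hmemF, hmuF⟩ :=
    pvFoldA_mid (pvNeighbors grid m.2.1 m.2.2) ((x :: t).erase m, visited) hns hmid0
  refine ⟨insert pm P, ?_, ?_⟩
  · refine ⟨hmidF.shape, hmidF.vis, hmidF.qitems, hmidF.qnodup, hmidF.pdisj, ?_, ?_,
      hmidF.gen, ?_, ?_⟩
    · intro p hp
      rcases Finset.mem_insert.mp hp with h | h
      · rw [h]; exact hreach
      · exact inv.preach p h
    · exact hmidF.start
    · intro p hp p' hv' hadj'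
      rcases Finset.mem_insert.mp hp with h | h
      · -- p = pm : every valid neighbour of pm was handled by the loop
        subst h
        exact hmemF p' (pvMem_neighbors.mpr ⟨hv', hadj'⟩)
      · exact hmidF.closure p h p' hv' hadj'
    · rw [inv.card, Finset.card_insert_of_notMem hpmP]
      push_cast
      ring
  · have hlen : ((x :: t).erase m).length = (x :: t).length - 1 :=
      List.length_erase_of_mem hmem
    have hl : 0 < (x :: t).length := by simp
    simp only [pvMu]
    dsimp only at hmuF
    omega

theorem pvAWhile_spec {grid : List (List Int)} {q : Int} :
    ∀ (fuel : Nat) (queue : List (Int × Int × Int)) (visited : List (List Bool))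
      (curr : Int) (P : Finset (Int × Int)),
      pvInvA grid q queue visited curr P → pvMu queue visited < fuel →
      ∃ P', pvInvA grid q (pvAWhile grid q fuel queue visited curr).1
              (pvAWhile grid q fuel queue visited curr).2.1
              (pvAWhile grid q fuel queue visited curr).2.2 P' ∧
            ∀ y ∈ (pvAWhile grid q fuel queue visited curr).1, q ≤ y.1 := by
  intro fuel
  induction fuel with
  | zero => intro queue visited curr P _ hmu; omega
  | succ fuel ih =>
    intro queue visited curr P hinv hmu
    cases queue with
    | nil =>
      refine ⟨P, ?_, ?_⟩
      · simpa only [pvAWhile] using hinv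
      · intro y hy
        simp only [pvAWhile] at hy
        simp at hy
    | cons x t =>
      by_cases hm : (pvHeapMin x t).1 < q
      · have heq : pvAWhile grid q (fuel + 1) (x :: t) visited curr =
            pvAWhile grid q fuel
              ((pvNeighbors grid (pvHeapMin x t).2.1 (pvHeapMin x t).2.2).foldl (pvStepA grid)
                ((x :: t).erase (pvHeapMin x t), visited)).1
              ((pvNeighbors grid (pvHeapMin x t).2.1 (pvHeapMin x t).2.2).foldl (pvStepA grid)
                ((x :: t).erase (pvHeapMin x t), visited)).2
              (curr + 1) := by
          simp only [pvAWhile, hm, if_pos]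
        obtain ⟨P1, hinv1, hmu1⟩ := pvIter_spec hinv hm
        rw [heq]
        exact ih _ _ _ P1 hinv1 (by omega)
      · have heq : pvAWhile grid q (fuel + 1) (x :: t) visited curr = (x :: t, visited, curr) := by
          simp only [pvAWhile, hm, if_neg, not_false_eq_true]
        rw [heq]
        refine ⟨P, hinv, ?_⟩
        intro y hy
        have := pvHeapMin_fst_le x t y hy
        omega

theorem pvFinal_count {grid : List (List Int)} {q : Int} {queue visited curr P}
    (inv : pvInvA grid q queue visited curr P) (hq : ∀ y ∈ queue, q ≤ y.1) :
    curr = (pvReachCount grid q : Int) := by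
  have hset : {p | pvReach grid q p} = (P : Set (Int × Int)) := by
    apply pvReach_set_eq
    · exact inv.preach
    · intro hv hlt
      rcases inv.start with h | h
      · exact h
      · exfalso
        rcases List.mem_map.mp h with ⟨t0, ht0, hcell⟩
        have hit := (inv.qitems t0 ht0).2
        have hq0 := hq t0 ht0
        rw [hcell] at hit
        omega
    · intro p hp p' hv hlt hadj
      rcases inv.closure p hp p' hv hadj with h | h
      · exact h
      · exfalso
        rcases List.mem_map.mp h with ⟨t0, ht0, hcell⟩
        have hit := (inv.qitems t0 ht0).2
        have hq0 := hq t0 ht0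
        rw [hcell] at hit
        omega
  rw [inv.card, pvReach_count_eq P hset]

-- ===== B-side invariant =====
structure pvInvB (grid : List (List Int)) (q : Int) (seen : List (Int × Int))
    (stack : List (Int × Int)) (n : Int) : Prop where
  snodup : seen.Nodup
  ssub : ∀ p ∈ stack, p ∈ seen
  stnodup : stack.Nodup
  sreach : ∀ p ∈ seen, pvReach grid q p
  closure : ∀ p ∈ seen, p ∉ stack → ∀ p', pvValid grid p' → pvCellVal grid p' < q →
    pvAdj p p' → p' ∈ seen
  start : ((0 : Int), (0 : Int)) ∈ seen
  count : n + (stack.length : Int) = (seen.length : Int)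

theorem pvAdj_of_mem_four {p p' : Int × Int}
    (h : p' ∈ [(p.1 + 1, p.2), (p.1 - 1, p.2), (p.1, p.2 + 1), (p.1, p.2 - 1)]) :
    pvAdj p p' := by
  rcases p' with ⟨a, b⟩
  simp only [List.mem_cons, List.not_mem_nil, or_false, Prod.mk.injEq] at h
  simp only [pvAdj]
  tauto

theorem pvBStep_cond {grid : List (List Int)} {q : Int}
    {s : PySem.Set (Int × Int) × List (Int × Int)} {p : Int × Int} :
    (decide (0 ≤ p.1) && decide (p.1 < ((grid.length : Int))) && decide (0 ≤ p.2) &&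
      decide (p.2 < PySem.List.len (PySem.List.pyGetD grid p.1 [])) &&
      decide (pvCellVal grid p < q) && !(PySem.Set.contains s.1 p)) = true ↔
    pvValid grid p ∧ pvCellVal grid p < q ∧ p ∉ s.1 := by
  simp only [Bool.and_eq_true, decide_eq_true_eq, Bool.not_eq_true', PySem.List.len_eq,
    pvValid]
  constructor
  · rintro ⟨⟨⟨⟨⟨h1, h2⟩, h3⟩, h4⟩, h5⟩, h6⟩
    rw [pvGetD_nonneg grid ([] : List Int) h1] at h4
    refine ⟨⟨h1, h2, h3, h4⟩, h5, ?_⟩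
    intro hcon
    rw [(PySem.Set.contains_iff s.1 p).mpr hcon] at h6
    simp at h6
  · rintro ⟨⟨h1, h2, h3, h4⟩, h5, h6⟩
    rw [pvGetD_nonneg grid ([] : List Int) h1]
    refine ⟨⟨⟨⟨⟨h1, h2⟩, h3⟩, h4⟩, h5⟩, ?_⟩
    cases hcc : PySem.Set.contains s.1 p
    · rfl
    · exact absurd ((PySem.Set.contains_iff s.1 p).mp hcc) h6

structure pvMidB (grid : List (List Int)) (q : Int) (pm : Int × Int)
    (s : PySem.Set (Int × Int) × List (Int × Int)) : Prop where
  snodup : s.1.Nodup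
  ssub : ∀ p ∈ s.2, p ∈ s.1
  stnodup : s.2.Nodup
  sreach : ∀ p ∈ s.1, pvReach grid q p
  closureOld : ∀ p ∈ s.1, p ∉ s.2 → p ≠ pm → ∀ p', pvValid grid p' → pvCellVal grid p' < q →
    pvAdj p p' → p' ∈ s.1
  start : ((0 : Int), (0 : Int)) ∈ s.1
  pmseen : pm ∈ s.1

theorem pvBStep_mid {grid : List (List Int)} {q : Int} {pm : Int × Int}
    {s : PySem.Set (Int × Int) × List (Int × Int)} {p' : Int × Int}
    (hadj : pvAdj pm p') (hmid : pvMidB grid q pm s) :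
    pvMidB grid q pm (pvBStep grid ((grid.length : Int)) q s p') ∧
    (pvValid grid p' → pvCellVal grid p' < q → p' ∈ (pvBStep grid ((grid.length : Int)) q s p').1) ∧
    (∀ a ∈ s.1, a ∈ (pvBStep grid ((grid.length : Int)) q s p').1) ∧
    ((pvBStep grid ((grid.length : Int)) q s p').1.length : Int) -
        ((pvBStep grid ((grid.length : Int)) q s p').2.length : Int) =
      (s.1.length : Int) - (s.2.length : Int) ∧
    (pvBStep grid ((grid.length : Int)) q s p').2.length +
        2 * ((pvCellList grid).length - (pvBStep grid ((grid.length : Int)) q s p').1.length) ≤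
      s.2.length + 2 * ((pvCellList grid).length - s.1.length) := by
  unfold pvBStep
  by_cases hc : pvValid grid p' ∧ pvCellVal grid p' < q ∧ p' ∉ s.1
  · rw [if_pos (pvBStep_cond.mpr hc)]
    obtain ⟨hv, hlt, hnotin⟩ := hc
    have hadd : PySem.Set.add s.1 p' = s.1 ++ [p'] := by
      unfold PySem.Set.add
      rw [if_neg]
      intro hcon
      exact hnotin ((PySem.Set.contains_iff s.1 p').mp hcon)
    have hreach' : pvReach grid q p' := pvReach.step (hmid.sreach pm hmid.pmseen) hv hlt hadj
    have hnodup' : (s.1 ++ [p']).Nodup := by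
      refine List.Nodup.append hmid.snodup (List.nodup_singleton _) ?_
      intro a ha hb
      simp only [List.mem_singleton] at hb
      subst hb
      exact hnotin ha
    have hlen : (s.1 ++ [p']).length ≤ (pvCellList grid).length := by
      apply pvLength_le_cellList hnodup'
      intro a ha
      rcases List.mem_append.mp ha with h | h
      · exact pvReach_valid (hmid.sreach a h)
      · simp only [List.mem_singleton] at h
        subst h
        exact hv
    rw [hadd]
    refine ⟨?_, ?_, ?_, ?_, ?_⟩
    · refine ⟨hnodup', ?_, ?_, ?_, ?_, ?_, ?_⟩
      · intro p hp
        rcases List.mem_cons.mp hp with h | h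
        · subst h; exact List.mem_append_right _ (List.mem_singleton_self _)
        · exact List.mem_append_left _ (hmid.ssub p h)
      · refine List.nodup_cons.mpr ⟨?_, hmid.stnodup⟩
        intro hcon
        exact hnotin (hmid.ssub p' hcon)
      · intro p hp
        rcases List.mem_append.mp hp with h | h
        · exact hmid.sreach p h
        · simp only [List.mem_singleton] at h
          subst h
          exact hreach'
      · intro p hp hst hpm p'' hv'' hlt'' hadj''
        rcases List.mem_append.mp hp with h | h
        · have : p ∉ s.2 := fun hcon => hst (List.mem_cons.mpr (Or.inr hcon))
          exact List.mem_append_left _ (hmid.closureOld p h this hpm p'' hv'' hlt'' hadj'')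
        · simp only [List.mem_singleton] at h
          subst h
          exact absurd (List.mem_cons_self) hst
      · exact List.mem_append_left _ hmid.start
      · exact List.mem_append_left _ hmid.pmseen
    · intro _ _
      exact List.mem_append_right _ (List.mem_singleton_self _)
    · intro a ha
      exact List.mem_append_left _ ha
    · simp only [List.length_append, List.length_cons, List.length_nil]
      push_cast
      omega
    · have hlen' : s.1.length + 1 ≤ (pvCellList grid).length := by simpa using hlen
      simp only [List.length_append, List.length_cons, List.length_nil]
      omega
  · rw [if_neg]
    · refine ⟨hmid, ?_, fun a ha => ha, by ring, le_refl _⟩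
      intro hv hlt
      by_cases hmem : p' ∈ s.1
      · exact hmem
      · exact absurd ⟨hv, hlt, hmem⟩ hc
    · intro hcon
      exact hc (pvBStep_cond.mp hcon)

theorem pvFoldB_mid {grid : List (List Int)} {q : Int} {pm : Int × Int} :
    ∀ (ms : List (Int × Int)) (s : PySem.Set (Int × Int) × List (Int × Int)),
      (∀ p' ∈ ms, pvAdj pm p') → pvMidB grid q pm s →
      pvMidB grid q pm (ms.foldl (pvBStep grid ((grid.length : Int)) q) s) ∧
      (∀ p' ∈ ms, pvValid grid p' → pvCellVal grid p' < q →
        p' ∈ (ms.foldl (pvBStep grid ((grid.length : Int)) q) s).1) ∧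
      (∀ a ∈ s.1, a ∈ (ms.foldl (pvBStep grid ((grid.length : Int)) q) s).1) ∧
      ((ms.foldl (pvBStep grid ((grid.length : Int)) q) s).1.length : Int) -
          ((ms.foldl (pvBStep grid ((grid.length : Int)) q) s).2.length : Int) =
        (s.1.length : Int) - (s.2.length : Int) ∧
      (ms.foldl (pvBStep grid ((grid.length : Int)) q) s).2.length +
          2 * ((pvCellList grid).length -
            (ms.foldl (pvBStep grid ((grid.length : Int)) q) s).1.length) ≤
        s.2.length + 2 * ((pvCellList grid).length - s.1.length) := by
  intro ms
  induction ms with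
  | nil => exact fun s _ hmid => ⟨hmid, by simp, fun a ha => ha, by simp, by simp⟩
  | cons p' rest ih =>
    intro s hms hmid
    obtain ⟨hmid', hmem', hmono', hbal', hmu'⟩ := pvBStep_mid (hms p' (List.mem_cons_self)) hmid
    obtain ⟨hmidF, hmemF, hmonoF, hbalF, hmuF⟩ :=
      ih (pvBStep grid ((grid.length : Int)) q s p') (fun a ha => hms a (List.mem_cons.mpr (Or.inr ha))) hmid'
    simp only [List.foldl_cons]
    refine ⟨hmidF, ?_, fun a ha => hmonoF a (hmono' a ha), by omega, by omega⟩
    intro a ha hv hlt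
    rcases List.mem_cons.mp ha with h | h
    · subst h
      exact hmonoF a (hmem' hv hlt)
    · exact hmemF a h hv hlt

theorem pvBLoop_spec {grid : List (List Int)} {q : Int} :
    ∀ (fuel : Nat) (seen : List (Int × Int)) (stack : List (Int × Int)) (n : Int),
      pvInvB grid q seen stack n →
      stack.length + 2 * ((pvCellList grid).length - seen.length) < fuel →
      pvBLoop grid ((grid.length : Int)) q fuel seen stack n = (pvReachCount grid q : Int) := by
  intro fuel
  induction fuel with
  | zero => intro seen stack n _ hmu; omega
  | succ fuel ih =>
    intro seen stack n hinv hmu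
    cases stack with
    | nil =>
      show n = _
      have hset : {p | pvReach grid q p} = ((seen.toFinset : Finset (Int × Int)) : Set (Int × Int)) := by
        apply pvReach_set_eq
        · intro p hp
          exact hinv.sreach p (List.mem_toFinset.mp hp)
        · intro _ _
          exact List.mem_toFinset.mpr hinv.start
        · intro p hp p' hv hlt hadj
          exact List.mem_toFinset.mpr
            (hinv.closure p (List.mem_toFinset.mp hp) (by simp) p' hv hlt hadj)
      rw [pvReach_count_eq _ hset]
      have hcard : seen.toFinset.card = seen.length := List.toFinset_card_of_nodup hinv.snodup
      have hcount := hinv.count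
      simp only [List.length_nil, Nat.cast_zero, add_zero] at hcount
      rw [hcard]
      exact hcount
    | cons p rest =>
      have hmid0 : pvMidB grid q p (seen, rest) := by
        refine ⟨hinv.snodup, ?_, (List.nodup_cons.mp hinv.stnodup).2, hinv.sreach, ?_,
          hinv.start, hinv.ssub p (List.mem_cons_self)⟩
        · intro a ha
          exact hinv.ssub a (List.mem_cons.mpr (Or.inr ha))
        · intro a ha hst hpm p' hv' hlt' hadj'
          refine hinv.closure a ha ?_ p' hv' hlt' hadj'
          intro hcon
          rcases List.mem_cons.mp hcon with h | h
          · exact hpm h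
          · exact hst h
      obtain ⟨hmidF, hmemF, hmonoF, hbalF, hmuF⟩ :=
        pvFoldB_mid [(p.1 + 1, p.2), (p.1 - 1, p.2), (p.1, p.2 + 1), (p.1, p.2 - 1)]
          (seen, rest) (fun p' h => pvAdj_of_mem_four h) hmid0
      show pvBLoop grid ((grid.length : Int)) q fuel _ _ (n + 1) = _
      have hinv' : pvInvB grid q
          ([(p.1 + 1, p.2), (p.1 - 1, p.2), (p.1, p.2 + 1), (p.1, p.2 - 1)].foldl
            (pvBStep grid ((grid.length : Int)) q) (seen, rest)).1
          ([(p.1 + 1, p.2), (p.1 - 1, p.2), (p.1, p.2 + 1), (p.1, p.2 - 1)].foldl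
            (pvBStep grid ((grid.length : Int)) q) (seen, rest)).2 (n + 1) := by
        refine ⟨hmidF.snodup, hmidF.ssub, hmidF.stnodup, hmidF.sreach, ?_, hmidF.start, ?_⟩
        · intro a ha hst p' hv' hlt' hadj'
          by_cases hap : a = p
          · subst hap
            exact hmemF p' (pvAdj_mem_four hadj') hv' hlt'
          · exact hmidF.closureOld a ha hst hap p' hv' hlt' hadj'
        · have hcount := hinv.count
          simp only [List.length_cons] at hcount
          dsimp only at hbalF
          push_cast at hcount ⊢
          omega
      apply ih _ _ _ hinv'
      dsimp only at hmuF
      simp only [List.length_cons] at hmu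
      omega

theorem pvBCount_eq (grid : List (List Int)) (q : Int) :
    pvBCount grid ((grid.length : Int)) q = (pvReachCount grid q : Int) := by
  unfold pvBCount
  by_cases hg : pvValid grid ((0 : Int), (0 : Int)) ∧ pvCellVal grid ((0 : Int), (0 : Int)) < q
  · obtain ⟨hv00, hlt⟩ := hg
    have hgrid : grid ≠ [] := by
      intro hcon
      subst hcon
      simp [pvValid] at hv00
    have hrow : PySem.List.pyGetD grid 0 [] ≠ [] := by
      rw [pvGetD_nonneg grid ([] : List Int) (le_refl 0)]
      intro hcon
      have h4 := hv00.2.2.2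
      simp only [Int.toNat_zero] at hcon h4
      rw [hcon] at h4
      simp at h4
    rw [if_pos (by
      simp only [Bool.and_eq_true, decide_eq_true_eq]
      exact ⟨⟨hgrid, hrow⟩, hlt⟩)]
    have hseen : PySem.Set.ofList [((0 : Int), (0 : Int))] = [((0 : Int), (0 : Int))] := rfl
    rw [hseen]
    have hinv0 : pvInvB grid q [((0 : Int), (0 : Int))] [((0 : Int), (0 : Int))] 0 := by
      refine ⟨List.nodup_singleton _, fun a ha => ha, List.nodup_singleton _, ?_, ?_, ?_, by simp⟩
      · intro p hp
        simp only [List.mem_singleton] at hp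
        subst hp
        exact pvReach.start hv00 hlt
      · intro p hp hst
        exact absurd hp hst
      · exact List.mem_singleton_self _
    have hN : 1 ≤ (pvCellList grid).length :=
      List.length_pos_of_mem (pvMem_cellList.mpr hv00)
    apply pvBLoop_spec _ _ _ _ hinv0
    simp only [List.length_singleton]
    omega
  · rw [if_neg (by
      simp only [Bool.and_eq_true, decide_eq_true_eq]
      rintro ⟨⟨hgrid, hrow⟩, hlt⟩
      apply hg
      refine ⟨⟨le_refl 0, ?_, le_refl 0, ?_⟩, hlt⟩
      · simpa using List.length_pos_of_ne_nil hgrid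
      · rw [pvGetD_nonneg grid ([] : List Int) (le_refl 0)] at hrow
        simp only [Int.toNat_zero]
        simpa using List.length_pos_of_ne_nil hrow)]
    rw [pvReach_empty hg]
    simp

theorem pvAlt_eq (grid : List (List Int)) (queries : List Int) :
    maxPoints_alt grid queries = queries.map (fun q => (pvReachCount grid q : Int)) := by
  unfold maxPoints_alt
  simp only [PySem.List.len_eq]
  congr 1
  funext q
  exact pvBCount_eq grid q

-- ===== A main =====
theorem pvOuter_spec {grid : List (List Int)} :
    ∀ (L : List (Int × Int)) (queue : List (Int × Int × Int)) (visited : List (List Bool))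
      (curr : Int) (soln : List Int) (P : Finset (Int × Int)) (q0 : Int),
      pvInvA grid q0 queue visited curr P →
      (∀ pr ∈ L, q0 ≤ pr.1) →
      L.Pairwise (fun a b => a.1 ≤ b.1) →
      (L.foldl
        (fun (st : List (Int × Int × Int) × List (List Bool) × Int × List Int) qi =>
          let r := pvAWhile grid qi.1 (st.1.length + 2 * pvCountFalse st.2.1 + 1)
            st.1 st.2.1 st.2.2.1
          (r.1, r.2.1, r.2.2, PySem.List.pySetD st.2.2.2 qi.2 r.2.2))
        (queue, visited, curr, soln)).2.2.2 =
      L.foldl (fun s pr => PySem.List.pySetD s pr.2 ((pvReachCount grid pr.1 : Int))) soln := by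
  intro L
  induction L with
  | nil => intro queue visited curr soln P q0 _ _ _; rfl
  | cons pr t ih =>
    intro queue visited curr soln P q0 hinv hq0 hpair
    simp only [List.foldl_cons]
    have hinv' := pvInvA_mono hinv (hq0 pr (List.mem_cons_self))
    obtain ⟨P', hinvP, hmin⟩ := pvAWhile_spec (queue.length + 2 * pvCountFalse visited + 1)
      queue visited curr P hinv' (by simp only [pvMu]; omega)
    have hcurr := pvFinal_count hinvP hmin
    rw [hcurr] at hinvP ⊢
    exact ih _ _ _ _ P' pr.1 hinvP
      (fun pr' h => (List.pairwise_cons.mp hpair).1 pr' h)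
      (List.pairwise_cons.mp hpair).2

theorem pvScatter_length (f : Int → Int) :
    ∀ (L : List (Int × Int)) (init : List Int),
      (L.foldl (fun s pr => PySem.List.pySetD s pr.2 (f pr.1)) init).length = init.length := by
  intro L
  induction L with
  | nil => intro init; rfl
  | cons pr t ih =>
    intro init
    rw [List.foldl_cons, ih]
    exact PySem.List.length_pySetD _ _ _

theorem pvScatter {queries : List Int} (f : Int → Int) :
    ∀ (L : List (Int × Int)) (init : List Int),
      init.length = queries.length →
      (∀ pr ∈ L, ∃ k : Nat, k < queries.length ∧ pr.2 = (k : Int) ∧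
        pr.1 = queries.getD k 0) →
      ∀ j : Nat, j < queries.length →
        (L.foldl (fun s pr => PySem.List.pySetD s pr.2 (f pr.1)) init).getD j 0 =
          if (j : Int) ∈ L.map Prod.snd then f (queries.getD j 0) else init.getD j 0 := by
  intro L
  induction L with
  | nil => intro init _ _ j hj; simp
  | cons pr t ih =>
    intro init hlen hmem j hj
    obtain ⟨k, hk, hk2, hk1⟩ := hmem pr (List.mem_cons_self)
    rw [List.foldl_cons]
    have hlen' : (PySem.List.pySetD init pr.2 (f pr.1)).length = queries.length := by
      rw [PySem.List.length_pySetD, hlen]  -- length of pySetD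
    rw [ih _ hlen' (fun pr' hpr' => hmem pr' (List.mem_cons.mpr (Or.inr hpr'))) j hj]
    rw [hk2, PySem.List.pySetD_of_nonneg _ _ (by omega : (0:Int) ≤ (k:Int))]
    simp only [List.map_cons, List.mem_cons, Int.toNat_natCast]
    by_cases hmem' : (j : Int) ∈ t.map Prod.snd
    · simp [hmem']
    · simp only [hmem', if_false, or_false]
      rw [pvGetD_set]
      by_cases hjk : j = k
      · subst hjk
        have : ((j : Int) = pr.2) := by rw [hk2]
        simp [this, hlen, hj, hk1]
      · have : ¬ ((j : Int) = pr.2) := by rw [hk2]; exact_mod_cast hjk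
        simp [this, hjk]

theorem sorted2_eq_lex (xs : List (Int × Int)) :
    PySem.List.sorted2 xs Prod.fst Prod.snd false
      = PySem.List.sorted xs (fun p => toLex p) false := by
  rw [PySem.List.sorted_eq_foldl_insertBy]
  show List.foldl (fun acc x => PySem.List.insertBy _ x acc) [] xs = _
  have h : (fun (a b : Int × Int) => decide (a.1 < b.1) || !decide (b.1 < a.1) && decide (a.2 < b.2))
      = fun a b => decide (toLex a < toLex b) := by
    funext a b
    rcases a with ⟨a1, a2⟩; rcases b with ⟨b1, b2⟩
    simp only [Prod.Lex.lt_iff]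
    by_cases h1 : a1 < b1 <;> by_cases h2 : b1 < a1 <;> by_cases h3 : a2 < b2 <;>
      simp [h1, h2, h3] <;> omega
  rw [h]
  simp

theorem sorted2_pairwise_fst (xs : List (Int × Int)) :
    (PySem.List.sorted2 xs Prod.fst Prod.snd false).Pairwise (fun a b => a.1 ≤ b.1) := by
  rw [sorted2_eq_lex]
  have := PySem.List.sorted_pairwise xs (fun p => toLex p)
  refine this.imp ?_
  intro a b h
  rcases Prod.Lex.le_iff.mp h with h | h
  · exact le_of_lt h
  · exact le_of_eq h.1

theorem maxPoints_eq (grid : List (List Int)) (queries : List Int)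
    (hdom : Dom_maxPoints grid queries) (hpre : Pre_maxPoints grid queries) :
    maxPoints grid queries = queries.map (fun q => (pvReachCount grid q : Int)) := by
  obtain ⟨hg, hh⟩ := hpre
  have hrow0 : grid.getD 0 [] ≠ [] := by
    cases grid with
    | nil => exact absurd rfl hg
    | cons a l => simpa using hh
  have hglen : 0 < grid.length := List.length_pos_of_ne_nil hg
  have hv00 : pvValid grid ((0 : Int), (0 : Int)) := by
    simp only [pvValid, Int.toNat_zero]
    exact ⟨le_refl 0, by exact_mod_cast hglen, le_refl 0,
      by exact_mod_cast List.length_pos_of_ne_nil hrow0⟩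
  -- names for the pieces of maxPoints
  set E : List (Int × Int) :=
    (PySem.List.enumerate queries).map (fun p => (p.2, p.1)) with hE
  set L : List (Int × Int) := PySem.List.sorted2 E Prod.fst Prod.snd with hL
  set M : List (List Bool) := grid.map (fun row => row.map (fun _ => false)) with hM
  set visited0 : List (List Bool) := pvVSet M 0 0 with hvis0
  set soln0 : List Int := queries.map (fun _ => (0 : Int)) with hsoln0
  have hMget : ∀ rn : Nat, M.getD rn [] = (grid.getD rn []).map (fun _ => false) := by
    intro rn
    by_cases h : rn < grid.length
    · rw [hM, List.getD_eq_getElem _ _ (by simpa using h), List.getD_eq_getElem _ _ h]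
      simp
    · rw [hM, List.getD_eq_default _ _ (by simpa using h), List.getD_eq_default _ _ (by omega)]
      simp
  have hMshape : pvShape grid M := by
    refine ⟨by simp [hM], fun r => by rw [hMget r]; simp⟩
  have hMfalse : ∀ p : Int × Int, pvValid grid p → pvVGet M p.1 p.2 = false := by
    intro p hp
    obtain ⟨h1, h2, h3, h4⟩ := hp
    rw [pvVGet_eq M h1 h3, hMget]
    have h5 : p.2.toNat < ((grid.getD p.1.toNat []).map (fun _ => false)).length := by
      simp only [List.length_map]
      omega
    rw [List.getD_eq_getElem _ _ h5]
    simp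
  have hperm : L.Perm E := PySem.List.sorted2_perm E Prod.fst Prod.snd false
  have hpair : L.Pairwise (fun a b => a.1 ≤ b.1) := sorted2_pairwise_fst E
  have hmemE : ∀ pr ∈ E, ∃ k : Nat, k < queries.length ∧ pr.2 = (k : Int) ∧
      pr.1 = queries.getD k 0 := by
    intro pr hpr
    rcases List.mem_map.mp hpr with ⟨p, hp, hpeq⟩
    rcases (PySem.List.mem_enumerate_iff _ _ _).mp hp with ⟨k, hk, hpk⟩
    refine ⟨k, hk, ?_, ?_⟩
    · rw [← hpeq, hpk]; simp
    · rw [← hpeq, hpk, List.getD_eq_getElem _ _ hk]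
  have hmemL : ∀ pr ∈ L, ∃ k : Nat, k < queries.length ∧ pr.2 = (k : Int) ∧
      pr.1 = queries.getD k 0 := fun pr h => hmemE pr (hperm.mem_iff.mp h)
  have hq0 : ∀ pr ∈ L, (-2147483649 : Int) ≤ pr.1 := by
    intro pr hpr
    obtain ⟨k, hk, _, hk1⟩ := hmemL pr hpr
    have hql : queries.getD k 0 ∈ queries := by
      rw [List.getD_eq_getElem _ _ hk]
      exact List.getElem_mem hk
    unfold Dom_maxPoints at hdom
    simp only [Bool.and_eq_true, List.all_eq_true, pvDomInt, decide_eq_true_eq] at hdom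
    have := hdom.2 _ hql
    omega
  have hinv0 : pvInvA grid (-2147483649)
      [(pvCellVal grid ((0 : Int), (0 : Int)), (0 : Int), (0 : Int))] visited0 0 ∅ := by
    have hr0 : (0 : Int).toNat < M.length := by simp [hM]; omega
    have hc0 : (0 : Int).toNat < (M.getD (0 : Int).toNat []).length := by
      rw [Int.toNat_zero, hMget 0]
      simpa using List.length_pos_of_ne_nil hrow0
    refine ⟨pvShape_vset hMshape (le_refl 0) (le_refl 0), ?_, ?_, ?_, ?_, ?_, ?_, ?_, ?_, ?_⟩
    · intro p hp
      rw [hvis0, pvVGet_vset (le_refl 0) (le_refl 0) hp.1 hp.2.2.1]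
      simp only [pvCells, List.map_cons, List.map_nil, Finset.notMem_empty, false_or,
        List.mem_singleton]
      constructor
      · intro h
        by_cases hp0 : p.1 = 0 ∧ p.2 = 0
        · exact Prod.ext hp0.1 hp0.2
        · rw [if_neg (by tauto)] at h
          rw [hMfalse p hp] at h
          exact absurd h (by simp)
      · intro h
        subst h
        rw [if_pos ⟨rfl, rfl, hr0, hc0⟩]
    · intro t ht
      simp only [List.mem_singleton] at ht
      subst ht
      exact ⟨hv00, rfl⟩
    · simp [pvCells]
    · simp
    · simp
    · right
      simp [pvCells]
    · intro p hp
      simp only [pvCells, List.map_cons, List.map_nil, List.mem_singleton] at hp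
      exact Or.inl hp
    · simp
    · simp
  have hout := pvOuter_spec L
    [(pvCellVal grid ((0 : Int), (0 : Int)), (0 : Int), (0 : Int))] visited0 0 soln0 ∅
    (-2147483649) hinv0 hq0 hpair
  have hdef : maxPoints grid queries = (L.foldl
      (fun (st : List (Int × Int × Int) × List (List Bool) × Int × List Int) qi =>
        let r := pvAWhile grid qi.1 (st.1.length + 2 * pvCountFalse st.2.1 + 1)
          st.1 st.2.1 st.2.2.1
        (r.1, r.2.1, r.2.2, PySem.List.pySetD st.2.2.2 qi.2 r.2.2))
      ([(pvCellVal grid ((0 : Int), (0 : Int)), (0 : Int), (0 : Int))],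
        visited0, (0 : Int), soln0)).2.2.2 := rfl
  rw [hdef, hout]
  -- the scattered pure fold is the per-query map
  have hcov : ∀ j : Nat, j < queries.length → ((j : Int)) ∈ L.map Prod.snd := by
    intro j hj
    rw [(hperm.map Prod.snd).mem_iff, hE, List.map_map]
    refine List.mem_map.mpr ⟨((0 : Int) + (j : Int), queries[j]), ?_, by simp⟩
    exact (PySem.List.mem_enumerate_iff _ _ _).mpr ⟨j, hj, rfl⟩
  have hlenf := pvScatter_length (fun q => (pvReachCount grid q : Int)) L soln0
  apply List.ext_getElem
  · rw [hlenf]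
    simp [hsoln0]
  · intro j h1 h2
    have hj : j < queries.length := by
      rw [hlenf] at h1
      simpa [hsoln0] using h1
    have hsc := pvScatter (fun q => (pvReachCount grid q : Int)) L soln0
      (by simp [hsoln0]) hmemL j hj
    rw [List.getD_eq_getElem _ _ h1] at hsc
    rw [hsc, if_pos (hcov j hj)]
    rw [List.getD_eq_getElem _ _ hj]
    simp

-- ===== VERDICT (by name: the statement is the Claim_ definition above) =====
theorem maxPoints_spec : Claim_equal_maxPoints := by
  intro grid queries hdom hpre
  unfold Spec_maxPoints
  rw [maxPoints_eq grid queries hdom hpre, pvAlt_eq]
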